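-- pv_equiv track=rewrite | github.com/liannnix/altrepoapi | utils.py | sort_branches
-- ===== SOURCE A (Python) =====
-- def sort_branches(branches):
--     """Use predefined sort list order for branch sorting."""
--     res = []
--     branches = set(branches)
--     sort_list = [
--         "sisyphus",
--         "sisyphus_e2k",
--         "sisyphus_mipsel",
--         "sisyphus_riscv64",
--         "p10",
--         "p9",
--         "p9_e2k",
--         "p9_mipsel",
--         "p8",
--         "p7",
--         "p6",
--         "p5",
--         "c9f2",
--         "c9f1",
--         "c9m2",
--         "c9m1",
--         "c8.1",
--         "c8",
--         "c7.1",
--         "c7",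
--         "c6",
--         "t7",
--         "t6",
--         "5.1",
--         "5.0",
--         "4.1",
--         "4.0",
--     ]
--     # add branches to result in accordance to sort_list order
--     for branch in sort_list:
--         if branch in branches:
--             res.append(branch)
--     # fall back: add branches from input that are missing from sort_list
--     diff = branches - set(res)
--     res += sorted([x for x in diff], reverse=True)
--     return tuple(res)
-- ===== SOURCE B (Python) =====
-- _SORT_LIST = [
--     "sisyphus", "sisyphus_e2k", "sisyphus_mipsel", "sisyphus_riscv64",
--     "p10", "p9", "p9_e2k", "p9_mipsel", "p8", "p7", "p6", "p5",
--     "c9f2", "c9f1", "c9m2", "c9m1", "c8.1", "c8", "c7.1", "c7", "c6",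
--     "t7", "t6", "5.1", "5.0", "4.1", "4.0",
-- ]
-- _RANK = {name: i for i, name in enumerate(_SORT_LIST)}
-- _UNKNOWN = len(_SORT_LIST)
--
--
-- def sort_branches(branches):
--     """One stable sort over the deduplicated branches with a composite key:
--     priority rank first (unknown branches share the max rank), then
--     reverse-alphabetical via reverse=True on the negated rank."""
--     return tuple(sorted(set(branches),
--                         key=lambda b: (-_RANK.get(b, _UNKNOWN), b),
--                         reverse=True))
-- ===== Notes on version B (the rewrite author's own statement) =====
-- stated objective: idiomatic
-- what changed: A's explicit scan over the fixed priority list plus a separate set-difference and reverse-sort of the leftovers is replaced by a single sorted() call over the deduplicated input with a composite key (negated priority rank from a precomputed rank dict, then name) and reverse=True.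
import Mathlib
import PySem

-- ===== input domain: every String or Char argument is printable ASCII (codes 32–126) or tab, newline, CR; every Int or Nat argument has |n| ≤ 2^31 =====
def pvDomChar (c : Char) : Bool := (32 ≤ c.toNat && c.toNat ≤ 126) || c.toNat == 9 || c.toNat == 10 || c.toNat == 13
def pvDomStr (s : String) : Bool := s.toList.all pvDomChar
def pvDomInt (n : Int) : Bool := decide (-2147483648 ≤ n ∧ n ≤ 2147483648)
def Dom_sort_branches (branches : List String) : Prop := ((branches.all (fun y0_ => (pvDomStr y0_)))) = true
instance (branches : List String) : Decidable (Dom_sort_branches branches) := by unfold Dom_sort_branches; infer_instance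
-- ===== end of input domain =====

-- B replaces A's fixed-list scan plus separate diff-sort by ONE sort of the deduplicated
-- input under a composite key (priority rank, then name), reverse=True; objective: idiomatic.
set_option maxRecDepth 10000

-- the predefined priority list (A's local `sort_list`, B's module-level `_SORT_LIST`)
def pvSortList : List String :=
  ["sisyphus", "sisyphus_e2k", "sisyphus_mipsel", "sisyphus_riscv64",
   "p10", "p9", "p9_e2k", "p9_mipsel", "p8", "p7", "p6", "p5",
   "c9f2", "c9f1", "c9m2", "c9m1", "c8.1", "c8", "c7.1", "c7", "c6",
   "t7", "t6", "5.1", "5.0", "4.1", "4.0"]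

-- ===== PORT A =====
def sort_branches (branches : List String) : List String :=
  -- res = []; branches = set(branches)
  let branchesSet : PySem.Set String := PySem.Set.ofList branches
  -- for branch in sort_list: if branch in branches: res.append(branch)
  let res : List String :=
    pvSortList.foldl
      (fun res branch => if PySem.Set.contains branchesSet branch then res ++ [branch] else res) []
  -- diff = branches - set(res); res += sorted([x for x in diff], reverse=True)
  let diff : PySem.Set String := PySem.Set.diff branchesSet (PySem.Set.ofList res)
  res ++ PySem.List.sorted diff (fun x => x) true

-- ===== PORT B =====
-- _RANK = {name: i for i, name in enumerate(_SORT_LIST)}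
def pvRank : PySem.Dict String Int :=
  (PySem.List.enumerate pvSortList 0).foldl (fun d p => d.insert p.2 p.1) PySem.Dict.empty

-- sorted(set(branches), key=lambda b: (-_RANK.get(b, _UNKNOWN), b), reverse=True)  (_UNKNOWN = 27)
def sort_branches_alt (branches : List String) : List String :=
  PySem.List.sorted2 (PySem.Set.ofList branches)
    (fun b => -(pvRank.getD b 27)) (fun b => b) true

-- ===== PRECONDITION & SPEC =====
def Spec_sort_branches (branches : List String) (out : List String) : Prop := out = sort_branches_alt branches
instance (branches : List String) (out : List String) : Decidable (Spec_sort_branches branches out) := by unfold Spec_sort_branches; infer_instance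

-- ===== CLAIM (what is proved, stated in full; the proofs are below) =====
def Claim_equal_sort_branches : Prop := ∀ (branches : List String), Dom_sort_branches branches → Spec_sort_branches branches (sort_branches branches)

-- ===== LEMMAS AND PROOFS =====

-- the Bool comparator that sorted2 (reverse=True) inserts by
def pvBefore {α κ₁ κ₂ : Type} [LinearOrder κ₁] [LinearOrder κ₂]
    (k1 : α → κ₁) (k2 : α → κ₂) (a b : α) : Bool :=
  decide (k1 b < k1 a) || (!decide (k1 a < k1 b) && decide (k2 b < k2 a))

theorem pvBefore_iff {α κ₁ κ₂ : Type} [LinearOrder κ₁] [LinearOrder κ₂]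
    (k1 : α → κ₁) (k2 : α → κ₂) (a b : α) :
    pvBefore k1 k2 a b = true ↔ (k1 b < k1 a ∨ (k1 a = k1 b ∧ k2 b < k2 a)) := by
  simp only [pvBefore, Bool.or_eq_true, Bool.and_eq_true, Bool.not_eq_eq_eq_not, Bool.not_true,
    decide_eq_true_eq, decide_eq_false_iff_not]
  constructor
  · rintro (h | ⟨h1, h2⟩)
    · exact Or.inl h
    · rcases lt_or_eq_of_le (le_of_not_gt h1) with h | h
      · exact Or.inl h
      · exact Or.inr ⟨h.symm, h2⟩
  · rintro (h | ⟨h1, h2⟩)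
    · exact Or.inl h
    · exact Or.inr ⟨by rw [h1]; exact lt_irrefl _, h2⟩

theorem pvBefore_eq_false_iff {α κ₁ κ₂ : Type} [LinearOrder κ₁] [LinearOrder κ₂]
    (k1 : α → κ₁) (k2 : α → κ₂) (a b : α) :
    pvBefore k1 k2 a b = false ↔ (k1 a < k1 b ∨ (k1 a = k1 b ∧ k2 a ≤ k2 b)) := by
  rw [← Bool.not_eq_true, pvBefore_iff]
  constructor
  · intro h
    rcases lt_trichotomy (k1 a) (k1 b) with h1 | h1 | h1
    · exact Or.inl h1
    · refine Or.inr ⟨h1, ?_⟩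
      by_contra hlt
      exact h (Or.inr ⟨h1, not_le.mp hlt⟩)
    · exact absurd (Or.inl h1) h
  · rintro (h | ⟨h1, h2⟩) hcon
    · rcases hcon with h' | ⟨h1', h2'⟩
      · exact lt_irrefl _ (lt_trans h h')
      · exact lt_irrefl _ (h1' ▸ h)
    · rcases hcon with h' | ⟨h1', h2'⟩
      · exact lt_irrefl _ (h1 ▸ h')
      · exact absurd h2' (not_lt.mpr h2)

theorem pvBefore_asymm {α κ₁ κ₂ : Type} [LinearOrder κ₁] [LinearOrder κ₂]
    (k1 : α → κ₁) (k2 : α → κ₂) (a b : α) (h : pvBefore k1 k2 a b = true) :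
    pvBefore k1 k2 b a = false := by
  rw [pvBefore_iff] at h
  rw [pvBefore_eq_false_iff]
  rcases h with h | ⟨h1, h2⟩
  · exact Or.inl h
  · exact Or.inr ⟨h1.symm, le_of_lt h2⟩

theorem pvBefore_trans {α κ₁ κ₂ : Type} [LinearOrder κ₁] [LinearOrder κ₂]
    (k1 : α → κ₁) (k2 : α → κ₂) (a b c : α)
    (hab : pvBefore k1 k2 a b = true) (hbc : pvBefore k1 k2 b c = true) :
    pvBefore k1 k2 a c = true := by
  rw [pvBefore_iff] at hab hbc ⊢
  rcases hab with h | ⟨h1, h2⟩ <;> rcases hbc with h' | ⟨h1', h2'⟩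
  · exact Or.inl (lt_trans h' h)
  · exact Or.inl (h1' ▸ h)
  · exact Or.inl (h1 ▸ h')
  · exact Or.inr ⟨h1.trans h1', lt_trans h2' h2⟩

theorem pvPairwise_insertBy {α κ₁ κ₂ : Type} [LinearOrder κ₁] [LinearOrder κ₂]
    (k1 : α → κ₁) (k2 : α → κ₂) (x : α) (ys : List α)
    (h : ys.Pairwise (fun a b => pvBefore k1 k2 b a = false)) :
    (PySem.List.insertBy (pvBefore k1 k2) x ys).Pairwise (fun a b => pvBefore k1 k2 b a = false) := by
  induction ys with
  | nil => simp [PySem.List.insertBy]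
  | cons y ys ih =>
    rcases List.pairwise_cons.mp h with ⟨hy, hys⟩
    by_cases hxy : pvBefore k1 k2 x y = true
    · rw [show PySem.List.insertBy (pvBefore k1 k2) x (y :: ys) = x :: y :: ys by
        simp [PySem.List.insertBy, hxy]]
      refine List.pairwise_cons.mpr ⟨?_, h⟩
      intro w hw
      rcases List.mem_cons.mp hw with hwy | hw
      · exact hwy ▸ pvBefore_asymm k1 k2 x y hxy
      · by_contra hc
        rw [Bool.not_eq_false] at hc
        exact absurd (pvBefore_trans k1 k2 w x y hc hxy)
          (by rw [Bool.not_eq_true]; exact hy w hw)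
    · rw [Bool.not_eq_true] at hxy
      rw [show PySem.List.insertBy (pvBefore k1 k2) x (y :: ys)
            = y :: PySem.List.insertBy (pvBefore k1 k2) x ys by
        simp [PySem.List.insertBy, hxy]]
      refine List.pairwise_cons.mpr ⟨?_, ih hys⟩
      intro w hw
      rcases (PySem.List.mem_insertBy _ _ _ _).mp hw with rfl | hw
      · exact hxy
      · exact hy w hw

theorem pvPairwise_foldl_insertBy {α κ₁ κ₂ : Type} [LinearOrder κ₁] [LinearOrder κ₂]
    (k1 : α → κ₁) (k2 : α → κ₂) (xs acc : List α)
    (hacc : acc.Pairwise (fun a b => pvBefore k1 k2 b a = false)) :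
    (xs.foldl (fun acc x => PySem.List.insertBy (pvBefore k1 k2) x acc) acc).Pairwise
      (fun a b => pvBefore k1 k2 b a = false) := by
  induction xs generalizing acc with
  | nil => exact hacc
  | cons x xs ih => exact ih _ (pvPairwise_insertBy k1 k2 x acc hacc)

theorem pvSorted2_rev_pairwise {α κ₁ κ₂ : Type} [LinearOrder κ₁] [LinearOrder κ₂]
    (xs : List α) (k1 : α → κ₁) (k2 : α → κ₂) :
    (PySem.List.sorted2 xs k1 k2 true).Pairwise (fun a b => pvBefore k1 k2 b a = false) := by
  have h0 : PySem.List.sorted2 xs k1 k2 true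
      = xs.foldl (fun acc x => PySem.List.insertBy (pvBefore k1 k2) x acc) [] := rfl
  rw [h0]
  exact pvPairwise_foldl_insertBy k1 k2 xs [] List.Pairwise.nil

-- uniqueness: any arrangement of xs that is pairwise "not-before-backwards" IS sorted2 … true
theorem pvSorted2_rev_eq {α κ₁ κ₂ : Type} [LinearOrder κ₁] [LinearOrder κ₂]
    (xs ys : List α) (k1 : α → κ₁) (k2 : α → κ₂)
    (hinj : ∀ a b : α, k1 a = k1 b → k2 a = k2 b → a = b)
    (hperm : ys.Perm xs)
    (hpair : ys.Pairwise (fun a b => pvBefore k1 k2 b a = false)) :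
    PySem.List.sorted2 xs k1 k2 true = ys := by
  refine List.Perm.eq_of_pairwise ?_ (pvSorted2_rev_pairwise xs k1 k2) hpair
    ((PySem.List.sorted2_perm xs k1 k2 true).trans hperm.symm)
  intro a b _ _ hab hba
  rw [pvBefore_eq_false_iff] at hab hba
  rcases hab with h | ⟨h1, h2⟩ <;> rcases hba with h' | ⟨h1', h2'⟩
  · exact absurd (lt_trans h h') (lt_irrefl _)
  · exact absurd (h1' ▸ h) (lt_irrefl _)
  · exact absurd (h1 ▸ h') (lt_irrefl _)
  · exact hinj a b h1' (le_antisymm h2' h2)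

-- concrete facts about the priority list and the rank dictionary
theorem pvSortList_nodup : pvSortList.Nodup := by decide

theorem pvRank_keys : pvRank.keys = pvSortList := by decide

theorem pvRank_mono : pvSortList.Pairwise (fun a b => pvRank.getD a 27 < pvRank.getD b 27) := by decide

theorem pvRank_lt_27 : ∀ x ∈ pvSortList, pvRank.getD x 27 < 27 := by decide

theorem pvRank_unknown (x : String) (hx : x ∉ pvSortList) : pvRank.getD x 27 = 27 := by
  apply PySem.Dict.getD_of_not_contains
  rw [PySem.Dict.contains_eq_decide_mem_keys, pvRank_keys]
  simp [hx]

-- A's loop result, as a filter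
theorem pvKnown_eq (s : PySem.Set String) :
    pvSortList.foldl
      (fun res branch => if PySem.Set.contains s branch then res ++ [branch] else res) []
      = pvSortList.filter (fun b => PySem.Set.contains s b) := by
  rw [PySem.List.foldl_append_if_eq_filter]
  rfl

theorem sort_branches_spec_aux (branches : List String) :
    sort_branches branches = sort_branches_alt branches := by
  have hcont : ∀ (t : List String) (x : String), PySem.Set.contains t x = true ↔ x ∈ t := by
    intro t x
    simp [PySem.Set.contains]
  set s : PySem.Set String := PySem.Set.ofList branches with hs
  have hsnd : s.Nodup := PySem.Set.nodup_ofList branches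
  set known : List String := pvSortList.filter (fun b => PySem.Set.contains s b) with hknown
  set diff : PySem.Set String := PySem.Set.diff s (PySem.Set.ofList known) with hdiff
  have hA : sort_branches branches = known ++ PySem.List.sorted diff (fun x => x) true := by
    show (let res := pvSortList.foldl
            (fun res branch => if PySem.Set.contains s branch then res ++ [branch] else res) [];
          let d := PySem.Set.diff s (PySem.Set.ofList res);
          res ++ PySem.List.sorted d (fun x => x) true)
        = known ++ PySem.List.sorted diff (fun x => x) true
    rw [pvKnown_eq s]
  rw [hA]
  -- membership characterizations
  have hmem_known : ∀ x, x ∈ known ↔ (x ∈ pvSortList ∧ x ∈ s) := by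
    intro x
    simp only [hknown, List.mem_filter]
    exact and_congr_right fun _ => hcont s x
  have hknown_nodup : known.Nodup := pvSortList_nodup.filter _
  have hdiff_eq : diff = s.filter (fun x => !(PySem.Set.contains (PySem.Set.ofList known) x)) := rfl
  have hmem_diff : ∀ x, x ∈ diff ↔ (x ∈ s ∧ x ∉ pvSortList) := by
    intro x
    rw [hdiff_eq]
    simp only [List.mem_filter, Bool.not_eq_eq_eq_not, Bool.not_true]
    constructor
    · rintro ⟨hxs, hxc⟩
      refine ⟨hxs, fun hxl => ?_⟩
      have : x ∈ PySem.Set.ofList known := (PySem.Set.mem_ofList known x).mpr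
        ((hmem_known x).mpr ⟨hxl, hxs⟩)
      rw [← Bool.not_eq_true] at hxc
      exact hxc ((hcont _ x).mpr this)
    · rintro ⟨hxs, hxl⟩
      refine ⟨hxs, ?_⟩
      rw [← Bool.not_eq_true]
      intro hc
      exact hxl ((hmem_known x).mp ((PySem.Set.mem_ofList known x).mp ((hcont _ x).mp hc))).1
  have hdiff_nodup : diff.Nodup := by rw [hdiff_eq]; exact hsnd.filter _
  -- the second block is a permutation of diff
  have hsnd_perm : (PySem.List.sorted diff (fun x => x) true).Perm diff :=
    PySem.List.sorted_perm diff (fun x => x) true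
  -- A's output is a permutation of set(branches)
  have hperm : (known ++ PySem.List.sorted diff (fun x => x) true).Perm s := by
    refine ((hknown.symm ▸ (List.Perm.refl known)).append hsnd_perm).trans ?_
    have h1 : known.Perm (s.filter (fun x => decide (x ∈ pvSortList))) := by
      rw [List.perm_ext_iff_of_nodup hknown_nodup (hsnd.filter _)]
      intro x
      rw [hmem_known x]
      simp only [List.mem_filter, decide_eq_true_eq]
      exact and_comm
    have h2 : diff.Perm (s.filter (fun x => !decide (x ∈ pvSortList))) := by
      rw [List.perm_ext_iff_of_nodup hdiff_nodup (hsnd.filter _)]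
      intro x
      rw [hmem_diff x]
      simp
    exact (h1.append h2).trans (List.filter_append_perm _ s)
  -- A's output is pairwise-ordered under B's comparator
  set k1 : String → Int := fun b => -(pvRank.getD b 27) with hk1
  set k2 : String → String := fun b => b with hk2
  have hpair : (known ++ PySem.List.sorted diff (fun x => x) true).Pairwise
      (fun a b => pvBefore k1 k2 b a = false) := by
    rw [List.pairwise_append]
    refine ⟨?_, ?_, ?_⟩
    · -- within the priority part: ranks strictly increase along pvSortList
      refine (pvRank_mono.sublist List.filter_sublist).imp ?_
      intro a b hab
      rw [pvBefore_eq_false_iff]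
      exact Or.inl (by simp only [hk1]; omega)
    · -- within the fallback part: equal rank 27, names weakly decrease
      have hsorted := PySem.List.sorted_pairwise_rev diff (fun x => x)
      refine List.Pairwise.imp_of_mem ?_ hsorted
      intro a b ha hb hba
      have ha' : a ∉ pvSortList :=
        ((hmem_diff a).mp ((PySem.List.mem_sorted diff (fun x => x) true a).mp ha)).2
      have hb' : b ∉ pvSortList :=
        ((hmem_diff b).mp ((PySem.List.mem_sorted diff (fun x => x) true b).mp hb)).2
      rw [pvBefore_eq_false_iff]
      refine Or.inr ⟨?_, hba⟩
      simp only [hk1, pvRank_unknown a ha', pvRank_unknown b hb']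
    · -- across: every priority branch precedes every unknown branch
      intro a ha b hb
      have ha' : a ∈ pvSortList := ((hmem_known a).mp ha).1
      have hb' : b ∉ pvSortList :=
        ((hmem_diff b).mp ((PySem.List.mem_sorted diff (fun x => x) true b).mp hb)).2
      rw [pvBefore_eq_false_iff]
      refine Or.inl ?_
      have h27 := pvRank_lt_27 a ha'
      simp only [hk1, pvRank_unknown b hb']
      omega
  exact (pvSorted2_rev_eq s (known ++ PySem.List.sorted diff (fun x => x) true) k1 k2
    (fun a b _ h2 => h2) hperm hpair).symm

-- ===== VERDICT (by name: the statement is the Claim_ definition above) =====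
theorem sort_branches_spec : Claim_equal_sort_branches := by
  intro branches _
  unfold Spec_sort_branches
  exact sort_branches_spec_aux branches
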